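-- pv_equiv track=rewrite | github.com/acescripters/KC | bot_www.py | _split_for_normal_mode
-- ===== SOURCE A (Python) =====
-- def _split_for_normal_mode(text):
--     """Split untuk MODE BIASA: max 2 lines, lebih pendek"""
--     if not text:
--         return ["..."]
--
--     text = text.strip()
--
--     if len(text) <= 120:
--         return [text]
--
--     # Try split pada natural point
--     mid = len(text) // 2
--
--     # Cari punctuation untuk split yang natural
--     for i in range(mid, len(text)):
--         if text[i] in '.!?;,':
--             line1 = text[:i+1].strip()
--             line2 = text[i+1:].strip()
--             if line1 and line2:
--                 return [line1, line2][:2]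
--
--     # Cari space
--     for i in range(mid, len(text)):
--         if text[i] == ' ':
--             line1 = text[:i].strip()
--             line2 = text[i+1:].strip()
--             if line1 and line2:
--                 return [line1, line2][:2]
--
--     # Split di tengah exact
--     return [text[:mid].strip(), text[mid:].strip()][:2]
-- ===== SOURCE B (Python) =====
-- def _split_for_normal_mode(text):
--     """Split untuk MODE BIASA: max 2 lines, lebih pendek"""
--     if not text:
--         return ["..."]
--
--     text = text.strip()
--     n = len(text)
--
--     if n <= 120:
--         return [text]
--
--     mid = n // 2
--
--     # Single scan: remember the first usable punctuation (break: it wins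
--     # outright) and, independently, the first space seen along the way.
--     # Since text is stripped and n > 120, both halves of any such split are
--     # non-empty except when the punctuation is the very last character.
--     punct_i = None
--     space_i = None
--     for i in range(mid, n):
--         c = text[i]
--         if c in '.!?;,' and i < n - 1:
--             punct_i = i
--             break
--         if space_i is None and c == ' ':
--             space_i = i
--
--     if punct_i is not None:
--         return [text[:punct_i + 1].strip(), text[punct_i + 1:].strip()]
--     if space_i is not None:
--         return [text[:space_i].strip(), text[space_i + 1:].strip()]
--     return [text[:mid].strip(), text[mid:].strip()]
-- ===== Notes on version B (the rewrite author's own statement) =====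
-- stated objective: alternative
-- what changed: Replaces A's two sequential full scans (punctuation pass, then space pass) by a single scan that breaks at the first usable punctuation while recording the first space on the way, and replaces the recomputed line1/line2 emptiness tests by the equivalent index bound i < n-1 (valid because the text is stripped and longer than 120).
import Mathlib
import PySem

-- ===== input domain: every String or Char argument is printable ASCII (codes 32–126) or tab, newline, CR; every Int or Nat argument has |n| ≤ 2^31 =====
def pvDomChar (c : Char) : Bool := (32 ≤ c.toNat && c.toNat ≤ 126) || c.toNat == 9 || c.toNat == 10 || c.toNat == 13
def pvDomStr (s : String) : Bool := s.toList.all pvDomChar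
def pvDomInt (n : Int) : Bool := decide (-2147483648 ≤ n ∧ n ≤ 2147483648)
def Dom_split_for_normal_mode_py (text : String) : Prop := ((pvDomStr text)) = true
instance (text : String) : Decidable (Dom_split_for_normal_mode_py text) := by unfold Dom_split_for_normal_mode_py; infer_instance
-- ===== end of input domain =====

-- B folds A's two sequential scans (punctuation pass, then space pass) into one early-breaking
-- scan with two trackers, replacing the per-candidate emptiness tests by the bound i < n-1;
-- the return values are proved equal on every input.

-- ===== PORT A =====
-- the punctuation string '.!?;,'
def pvPunct : List Char := ['.', '!', '?', ';', ',']

-- A's first loop: "for i in range(mid, len(text)): if text[i] in '.!?;,': …" with early return.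
-- text[i] is always in range here (i comes from range(mid, len(text))); the `none` arm is unreachable.
def pvALoop1 (t : List Char) (idxs : List Int) : Option (List String) :=
  match idxs with
  | [] => none
  | i :: rest =>
    match PySem.List.pyGet? t i with
    | none => none
    | some c =>
      if c ∈ pvPunct then
        let line1 := PySem.Chars.strip (PySem.List.slice t none (some (i + 1)))
        let line2 := PySem.Chars.strip (PySem.List.slice t (some (i + 1)) none)
        if line1 ≠ [] ∧ line2 ≠ [] then
          some (PySem.List.slice [String.ofList line1, String.ofList line2] none (some 2))
        else pvALoop1 t rest
      else pvALoop1 t rest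

-- A's second loop: "for i in range(mid, len(text)): if text[i] == ' ': …" with early return.
def pvALoop2 (t : List Char) (idxs : List Int) : Option (List String) :=
  match idxs with
  | [] => none
  | i :: rest =>
    match PySem.List.pyGet? t i with
    | none => none
    | some c =>
      if c = ' ' then
        let line1 := PySem.Chars.strip (PySem.List.slice t none (some i))
        let line2 := PySem.Chars.strip (PySem.List.slice t (some (i + 1)) none)
        if line1 ≠ [] ∧ line2 ≠ [] then
          some (PySem.List.slice [String.ofList line1, String.ofList line2] none (some 2))
        else pvALoop2 t rest
      else pvALoop2 t rest

def split_for_normal_mode_py (text : String) : List String :=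
  if text.toList = [] then ["..."]
  else
    let t := PySem.Chars.strip text.toList
    if (t.length : Int) ≤ 120 then [String.ofList t]
    else
      let mid := PySem.Int.floordiv (t.length : Int) 2
      match pvALoop1 t (PySem.List.pyRange mid (t.length : Int)) with
      | some r => r
      | none =>
        match pvALoop2 t (PySem.List.pyRange mid (t.length : Int)) with
        | some r => r
        | none =>
          PySem.List.slice
            [String.ofList (PySem.Chars.strip (PySem.List.slice t none (some mid))),
             String.ofList (PySem.Chars.strip (PySem.List.slice t (some mid) none))]
            none (some 2)

-- ===== PORT B =====
-- B's single loop: records the first space index, breaks at the first punctuation with i < n-1.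
def pvBLoop (t : List Char) (n : Int) (idxs : List Int) (spaceI : Option Int) :
    Option Int × Option Int :=
  match idxs with
  | [] => (none, spaceI)
  | i :: rest =>
    match PySem.List.pyGet? t i with
    | none => (none, spaceI)
    | some c =>
      if c ∈ pvPunct ∧ i < n - 1 then (some i, spaceI)
      else if spaceI = none ∧ c = ' ' then pvBLoop t n rest (some i)
      else pvBLoop t n rest spaceI

def split_for_normal_mode_py_alt (text : String) : List String :=
  if text.toList = [] then ["..."]
  else
    let t := PySem.Chars.strip text.toList
    let n : Int := (t.length : Int)
    if n ≤ 120 then [String.ofList t]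
    else
      let mid := PySem.Int.floordiv n 2
      match pvBLoop t n (PySem.List.pyRange mid n) none with
      | (some p, _) =>
        [String.ofList (PySem.Chars.strip (PySem.List.slice t none (some (p + 1)))),
         String.ofList (PySem.Chars.strip (PySem.List.slice t (some (p + 1)) none))]
      | (none, some s) =>
        [String.ofList (PySem.Chars.strip (PySem.List.slice t none (some s))),
         String.ofList (PySem.Chars.strip (PySem.List.slice t (some (s + 1)) none))]
      | (none, none) =>
        [String.ofList (PySem.Chars.strip (PySem.List.slice t none (some mid))),
         String.ofList (PySem.Chars.strip (PySem.List.slice t (some mid) none))]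

-- ===== PRECONDITION & SPEC =====
def Spec_split_for_normal_mode_py (text : String) (out : List String) : Prop := out = split_for_normal_mode_py_alt text
instance (text : String) (out : List String) : Decidable (Spec_split_for_normal_mode_py text out) := by unfold Spec_split_for_normal_mode_py; infer_instance

-- ===== CLAIM (what is proved, stated in full; the proofs are below) =====
def Claim_equal_split_for_normal_mode_py : Prop := ∀ (text : String), Dom_split_for_normal_mode_py text → Spec_split_for_normal_mode_py text (split_for_normal_mode_py text)

-- ===== LEMMAS AND PROOFS =====

-- abbreviations for the three possible results (proof-side only)
def pvPunctRes (t : List Char) (p : Int) : List String :=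
  [String.ofList (PySem.Chars.strip (PySem.List.slice t none (some (p + 1)))),
   String.ofList (PySem.Chars.strip (PySem.List.slice t (some (p + 1)) none))]

def pvSpaceRes (t : List Char) (s : Int) : List String :=
  [String.ofList (PySem.Chars.strip (PySem.List.slice t none (some s))),
   String.ofList (PySem.Chars.strip (PySem.List.slice t (some (s + 1)) none))]


lemma pvStrip_eq_nil_iff (l : List Char) :
    PySem.Chars.strip l = [] ↔ ∀ x ∈ l, PySem.Chars.isspace x = true := by
  simp only [PySem.Chars.strip, PySem.Chars.rstrip, PySem.Chars.lstrip,
    List.reverse_eq_nil_iff, List.dropWhile_eq_nil_iff, List.mem_reverse]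
  constructor
  · intro h x hx
    have hx' : x ∈ l.takeWhile PySem.Chars.isspace ++ l.dropWhile PySem.Chars.isspace := by
      rw [List.takeWhile_append_dropWhile]; exact hx
    rcases List.mem_append.mp hx' with h1 | h1
    · exact List.mem_takeWhile_imp h1
    · exact h x h1
  · intro h x hx
    exact h x ((List.dropWhile_suffix _).subset hx)

lemma pvStrip_ne_nil_of_mem (l : List Char) (c : Char) (hc : c ∈ l)
    (h : PySem.Chars.isspace c = false) : PySem.Chars.strip l ≠ [] := by
  intro hnil
  have := (pvStrip_eq_nil_iff l).mp hnil c hc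
  simp [h] at this

lemma pvStrip_head (l : List Char) (h : PySem.Chars.strip l ≠ []) :
    PySem.Chars.isspace ((PySem.Chars.strip l).head h) = false := by
  set m := List.dropWhile PySem.Chars.isspace l with hm
  set d := List.dropWhile PySem.Chars.isspace m.reverse with hd
  have hs : PySem.Chars.strip l = d.reverse := rfl
  have hdd : d <:+ m.reverse := List.dropWhile_suffix _
  have hpre : d.reverse <+: m := by
    rw [← List.reverse_reverse d] at hdd
    exact List.reverse_suffix.mp hdd
  have hdne : d.reverse ≠ [] := by rw [← hs]; exact h
  obtain ⟨r, hr⟩ := hpre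
  obtain ⟨c, tl, hct⟩ : ∃ c tl, d.reverse = c :: tl := by
    cases hdr : d.reverse with
    | nil => exact absurd hdr hdne
    | cons a b => exact ⟨a, b, rfl⟩
  have hmeq : m = c :: (tl ++ r) := by rw [← hr, hct]; rfl
  have hmne : m ≠ [] := by rw [hmeq]; simp
  have h2 := List.head_dropWhile_not PySem.Chars.isspace (l := l) hmne
  have h3 : m.head hmne = c := by simp [hmeq]
  have h4 : (PySem.Chars.strip l).head h = c := by simp [hs, hct]
  rw [h4]; rw [h3] at h2; exact h2

lemma pvStrip_getLast (l : List Char) (h : PySem.Chars.strip l ≠ []) :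
    PySem.Chars.isspace ((PySem.Chars.strip l).getLast h) = false := by
  set m := List.dropWhile PySem.Chars.isspace l with hm
  set d := List.dropWhile PySem.Chars.isspace m.reverse with hd
  have hs : PySem.Chars.strip l = d.reverse := rfl
  have hdne : d ≠ [] := by
    intro hnil; apply h; rw [hs, hnil]; rfl
  obtain ⟨c, tl, hct⟩ : ∃ c tl, d = c :: tl := by
    cases hdr : d with
    | nil => exact absurd hdr hdne
    | cons a b => exact ⟨a, b, rfl⟩
  have h2 := List.head_dropWhile_not PySem.Chars.isspace (l := m.reverse) hdne
  have h3 : d.head hdne = c := by simp [hct]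
  have h4 : (PySem.Chars.strip l).getLast h = c := by simp [hs, hct]
  rw [h4]; rw [h3] at h2; exact h2


lemma pvTake_ne (t : List Char) (ht : t ≠ [])
    (hH : PySem.Chars.isspace (t.head ht) = false) (m : Nat) (hm : 0 < m) :
    PySem.Chars.strip (t.take m) ≠ [] := by
  cases t with
  | nil => exact absurd rfl ht
  | cons a tl =>
    cases m with
    | zero => omega
    | succ k =>
      apply pvStrip_ne_nil_of_mem _ a
      · simp [List.take]
      · simpa using hH

lemma pvDrop_ne (t : List Char) (ht : t ≠ [])
    (hL : PySem.Chars.isspace (t.getLast ht) = false) (k : Nat) (hk : k < t.length) :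
    PySem.Chars.strip (t.drop k) ≠ [] := by
  have hdne : t.drop k ≠ [] := by
    intro hnil
    have := List.length_drop (l := t) (i := k)
    rw [hnil] at this; simp at this; omega
  apply pvStrip_ne_nil_of_mem _ (t.getLast ht)
  · rw [← List.getLast_drop hdne]
    exact List.getLast_mem hdne
  · exact hL

lemma pvPunct_ne_space {c : Char} (hc : c ∈ pvPunct) : c ≠ ' ' := by
  simp only [pvPunct, List.mem_cons, List.not_mem_nil, or_false] at hc
  rcases hc with rfl | rfl | rfl | rfl | rfl <;> decide

lemma pvTake2 (x y : String) :
    PySem.List.slice [x, y] none (some 2) = [x, y] := by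
  rw [PySem.List.slice_to _ (by norm_num : (0:Int) ≤ 2)]
  rfl

lemma pvLoop_eq (t : List Char) (ht : t ≠ [])
    (hH : PySem.Chars.isspace (t.head ht) = false)
    (hL : PySem.Chars.isspace (t.getLast ht) = false)
    (dflt : List String)
    (idxs : List Int) (hidx : ∀ i ∈ idxs, 1 ≤ i ∧ i < (t.length : Int)) :
    ∀ sp : Option Int,
    (match pvBLoop t (t.length : Int) idxs sp with
     | (some p, _) => pvPunctRes t p
     | (none, some s) => pvSpaceRes t s
     | (none, none) => dflt)
    =
    (match pvALoop1 t idxs with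
     | some r => r
     | none =>
       match sp with
       | some s => pvSpaceRes t s
       | none =>
         match pvALoop2 t idxs with
         | some r => r
         | none => dflt) := by
  induction idxs with
  | nil =>
    intro sp
    cases sp <;> rfl
  | cons i rest ih =>
    intro sp
    obtain ⟨hi1, hi2⟩ := hidx i (List.mem_cons_self)
    have hidx' : ∀ j ∈ rest, 1 ≤ j ∧ j < (t.length : Int) :=
      fun j hj => hidx j (List.mem_cons_of_mem _ hj)
    have ih' := ih hidx'
    have hjlt : i.toNat < t.length := by omega
    have hij : i = (i.toNat : Int) := (Int.toNat_of_nonneg (by omega)).symm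
    have hget : PySem.List.pyGet? t i = some (t[i.toNat]'hjlt) := by
      rw [← List.getElem?_eq_getElem hjlt]
      conv_lhs => rw [hij]
      exact PySem.List.pyGet?_natCast t i.toNat
    set c := t[i.toNat]'hjlt with hc
    have hsl1 : PySem.List.slice t none (some (i + 1)) = t.take (i.toNat + 1) := by
      rw [PySem.List.slice_to _ (by omega : (0:Int) ≤ i + 1)]
      congr 1; omega
    have hsl2 : PySem.List.slice t (some (i + 1)) none = t.drop (i.toNat + 1) := by
      rw [PySem.List.slice_from _ (by omega : (0:Int) ≤ i + 1)]
      congr 1; omega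
    have hsl3 : PySem.List.slice t none (some i) = t.take i.toNat := by
      rw [PySem.List.slice_to _ (by omega : (0:Int) ≤ i)]
    simp only [pvBLoop, pvALoop1, pvALoop2, hget]
    by_cases hp : c ∈ pvPunct
    · by_cases hlt : i < (t.length : Int) - 1
      · -- valid punctuation: both sides return the punctuation split at i
        have hl1 : PySem.Chars.strip (PySem.List.slice t none (some (i + 1))) ≠ [] := by
          rw [hsl1]; exact pvTake_ne t ht hH _ (by omega)
        have hl2 : PySem.Chars.strip (PySem.List.slice t (some (i + 1)) none) ≠ [] := by
          rw [hsl2]; exact pvDrop_ne t ht hL _ (by omega)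
        simp [hp, hlt, hl1, hl2, pvTake2, pvPunctRes]
      · -- punctuation at the very last position: both loops skip it
        have hl2 : PySem.Chars.strip (PySem.List.slice t (some (i + 1)) none) = [] := by
          rw [hsl2]
          have hdnil : t.drop (i.toNat + 1) = [] := by
            apply List.drop_eq_nil_of_le; omega
          rw [hdnil]; rfl
        have hcs : ¬ (c = ' ') := pvPunct_ne_space hp
        rw [if_neg (show ¬ (c ∈ pvPunct ∧ i < (t.length : Int) - 1) from fun h => hlt h.2),
          if_pos hp,
          if_neg (show ¬ (PySem.Chars.strip (PySem.List.slice t none (some (i + 1))) ≠ [] ∧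
            PySem.Chars.strip (PySem.List.slice t (some (i + 1)) none) ≠ []) from fun h => h.2 hl2),
          if_neg hcs]
        cases sp with
        | none =>
          rw [if_neg (show ¬ ((none : Option Int) = none ∧ c = ' ') from fun h => hcs h.2)]
          exact ih' none
        | some s =>
          rw [if_neg (show ¬ ((some s : Option Int) = none ∧ c = ' ') from
            fun h => Option.some_ne_none _ h.1)]
          exact ih' (some s)
    · by_cases hcs : c = ' '
      · -- a space: A's second loop would return here; B records the first one
        have hl1 : PySem.Chars.strip (PySem.List.slice t none (some i)) ≠ [] := by
          rw [hsl3]; exact pvTake_ne t ht hH _ (by omega)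
        have hnotlast : i.toNat < t.length - 1 := by
          by_contra hcon
          have hilast : i.toNat = t.length - 1 := by omega
          have hgl : t.getLast ht = c := by
            rw [List.getLast_eq_getElem]; simp [hc, hilast]
          rw [hgl, hcs] at hL
          simpa using (show PySem.Chars.isspace ' ' = true by decide).symm.trans hL
        have hl2 : PySem.Chars.strip (PySem.List.slice t (some (i + 1)) none) ≠ [] := by
          rw [hsl2]; exact pvDrop_ne t ht hL _ (by omega)
        rw [if_neg (show ¬ (c ∈ pvPunct ∧ i < (t.length : Int) - 1) from fun h => hp h.1),
          if_neg hp]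
        cases sp with
        | none =>
          rw [if_pos (show (none : Option Int) = none ∧ c = ' ' from ⟨rfl, hcs⟩),
            ih' (some i), if_pos hcs,
            if_pos (show PySem.Chars.strip (PySem.List.slice t none (some i)) ≠ [] ∧
              PySem.Chars.strip (PySem.List.slice t (some (i + 1)) none) ≠ [] from ⟨hl1, hl2⟩)]
          cases pvALoop1 t rest <;> simp [pvSpaceRes, pvTake2]
        | some s =>
          rw [if_neg (show ¬ ((some s : Option Int) = none ∧ c = ' ') from
            fun h => Option.some_ne_none _ h.1), ih' (some s)]
      · -- ordinary character: both sides skip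
        rw [if_neg (show ¬ (c ∈ pvPunct ∧ i < (t.length : Int) - 1) from fun h => hp h.1),
          if_neg hp, if_neg hcs]
        cases sp with
        | none =>
          rw [if_neg (show ¬ ((none : Option Int) = none ∧ c = ' ') from fun h => hcs h.2)]
          exact ih' none
        | some s =>
          rw [if_neg (show ¬ ((some s : Option Int) = none ∧ c = ' ') from
            fun h => Option.some_ne_none _ h.1)]
          exact ih' (some s)

-- ===== VERDICT (by name: the statement is the Claim_ definition above) =====
theorem split_for_normal_mode_py_spec : Claim_equal_split_for_normal_mode_py := by
  unfold Claim_equal_split_for_normal_mode_py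
  intro text _
  unfold Spec_split_for_normal_mode_py
  unfold split_for_normal_mode_py split_for_normal_mode_py_alt
  by_cases h0 : text.toList = []
  · simp [h0]
  · simp only [if_neg h0]
    set t := PySem.Chars.strip text.toList with htdef
    by_cases h120 : (t.length : Int) ≤ 120
    · simp [h120]
    · simp only [if_neg h120]
      have hlen : 120 < (t.length : Int) := by omega
      have ht : t ≠ [] := by
        intro h; rw [h] at hlen; simp at hlen
      have hH : PySem.Chars.isspace (t.head ht) = false := pvStrip_head text.toList ht
      have hL : PySem.Chars.isspace (t.getLast ht) = false := pvStrip_getLast text.toList ht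
      have hmid : PySem.Int.floordiv (t.length : Int) 2 = (t.length : Int) / 2 :=
        PySem.Int.floordiv_eq_ediv_of_pos (by norm_num)
      have hidx : ∀ i ∈ PySem.List.pyRange (PySem.Int.floordiv (t.length : Int) 2)
          (t.length : Int), 1 ≤ i ∧ i < (t.length : Int) := by
        intro i hi
        rw [PySem.List.mem_pyRange_one] at hi
        omega
      rw [pvTake2]
      have key := (pvLoop_eq t ht hH hL
        [String.ofList (PySem.Chars.strip (PySem.List.slice t none
            (some (PySem.Int.floordiv (t.length : Int) 2)))),
         String.ofList (PySem.Chars.strip (PySem.List.slice t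
            (some (PySem.Int.floordiv (t.length : Int) 2)) none))]
        (PySem.List.pyRange (PySem.Int.floordiv (t.length : Int) 2) (t.length : Int))
        hidx none).symm
      simp only [pvPunctRes, pvSpaceRes] at key
      exact key
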